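-- pv_equiv track=rewrite | github.com/UL-FRI-NLP-Course/ul-fri-nlp-course-project-2024-2025-coccodrillo | report/code/read_pdf.py | get_vaccinazioni
-- ===== SOURCE A (Python) =====
-- def get_vaccinazioni(testo):
--     lines = testo.splitlines()
--     paragrafo = ""
--     collecting = False
--     started_collecting = False
--
--     for i, line in enumerate(lines):
--         stripped = line.strip()
--
--         # Trova la riga con solo "Vaccinazioni"
--         if not collecting and stripped.lower() == "vaccinazioni":
--             paragrafo += "Vaccinazioni:\n"
--             collecting = True
--             continue
--
--         if collecting:
--             # Salta righe vuote iniziali dopo "Vaccinazioni"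
--             if not started_collecting:
--                 if stripped == "":
--                     continue
--                 else:
--                     started_collecting = True
--
--             # Condizione di uscita: riga vuota + riga successiva non vuota
--             if stripped == "" and i + 1 < len(lines) and lines[i + 1].strip() != "":
--                 break
--
--             # Aggiungi il contenuto alla stringa finale
--             paragrafo += " " + stripped
--
--     return paragrafo.strip() if paragrafo else None
-- ===== SOURCE B (Python) =====
-- def get_vaccinazioni(testo):
--     lines = testo.splitlines()
--     n = len(lines)
--     # phase 1: find the header line
--     h = 0
--     while h < n and lines[h].strip().lower() != "vaccinazioni":
--         h += 1
--     if h == n: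
--         return None
--     # phase 2: skip blank lines after the header
--     s = h + 1
--     while s < n and lines[s].strip() == "":
--         s += 1
--     # phase 3: find the end of the paragraph
--     e = s
--     while e < n and not (lines[e].strip() == "" and e + 1 < n and lines[e + 1].strip() != ""):
--         e += 1
--     # phase 4: build the paragraph
--     return ("Vaccinazioni:\n" + "".join(" " + lines[j].strip() for j in range(s, e))).strip()
-- ===== Notes on version B (the rewrite author's own statement) =====
-- stated objective: simpler
-- what changed: Replaces A's single flag-driven loop with three boolean state variables by a four-phase decomposition: find the header index, skip blank lines, find the paragraph end, then build the result with a join over the index range.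
import Mathlib
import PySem

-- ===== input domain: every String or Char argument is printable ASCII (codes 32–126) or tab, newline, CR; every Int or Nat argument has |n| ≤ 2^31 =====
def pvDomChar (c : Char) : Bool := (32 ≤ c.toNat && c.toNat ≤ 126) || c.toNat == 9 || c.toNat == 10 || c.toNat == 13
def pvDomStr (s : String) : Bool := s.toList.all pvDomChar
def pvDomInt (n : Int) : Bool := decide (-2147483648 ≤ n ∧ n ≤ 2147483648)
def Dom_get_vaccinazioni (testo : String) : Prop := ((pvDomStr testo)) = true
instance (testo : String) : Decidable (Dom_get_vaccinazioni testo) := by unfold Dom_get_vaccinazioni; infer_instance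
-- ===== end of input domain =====

-- B replaces A's single flag-driven loop by a four-phase decomposition (find header, skip blanks, find end, build); objective: simpler, same cost.

-- ===== PORT A =====
-- A's for-loop over enumerate(lines) with state (paragrafo, collecting, started_collecting); break = return para.
def pvLoopA (lines : List String) (i : Nat) (para : String) (coll started : Bool) : String :=
  if _h : i < lines.length then
    let stripped := PySem.Str.strip (lines.getD i "")
    if !coll && (PySem.Str.lower stripped == "vaccinazioni") then
      pvLoopA lines (i+1) (para ++ "Vaccinazioni:\n") true started
    else if coll then
      if !started && (stripped == "") then
        pvLoopA lines (i+1) para coll started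
      else if (stripped == "") && decide (i+1 < lines.length) && !(PySem.Str.strip (lines.getD (i+1) "") == "") then
        para
      else
        pvLoopA lines (i+1) (para ++ " " ++ stripped) coll true
    else
      pvLoopA lines (i+1) para coll started
  else para
termination_by lines.length - i

def get_vaccinazioni (testo : String) : Option String :=
  let lines := PySem.Str.splitlines testo
  let para := pvLoopA lines 0 "" false false
  if para == "" then none else some (PySem.Str.strip para)

-- ===== PORT B =====
-- phase 1: first index whose stripped, lowered line is "vaccinazioni"
def pvFindH (lines : List String) (h : Nat) : Nat :=
  if _hh : h < lines.length then
    if !(PySem.Str.lower (PySem.Str.strip (lines.getD h "")) == "vaccinazioni") then pvFindH lines (h+1) else h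
  else h
termination_by lines.length - h

-- phase 2: skip blank lines
def pvSkipS (lines : List String) (s : Nat) : Nat :=
  if _hs : s < lines.length then
    if PySem.Str.strip (lines.getD s "") == "" then pvSkipS lines (s+1) else s
  else s
termination_by lines.length - s

-- phase 3: end of paragraph: first blank line followed by a non-blank one
def pvFindE (lines : List String) (e : Nat) : Nat :=
  if _he : e < lines.length then
    if !((PySem.Str.strip (lines.getD e "") == "") && decide (e+1 < lines.length) && !(PySem.Str.strip (lines.getD (e+1) "") == "")) then
      pvFindE lines (e+1)
    else e
  else e
termination_by lines.length - e

def get_vaccinazioni_alt (testo : String) : Option String :=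
  let lines := PySem.Str.splitlines testo
  let n := lines.length
  let h := pvFindH lines 0
  if h == n then none
  else
    let s := pvSkipS lines (h+1)
    let e := pvFindE lines s
    some (PySem.Str.strip ("Vaccinazioni:\n" ++
      PySem.Str.join "" ((List.range' s (e - s)).map (fun j => " " ++ PySem.Str.strip (lines.getD j "")))))

-- ===== PRECONDITION & SPEC =====
def Spec_get_vaccinazioni (testo : String) (out : Option String) : Prop := out = get_vaccinazioni_alt testo
instance (testo : String) (out : Option String) : Decidable (Spec_get_vaccinazioni testo out) := by unfold Spec_get_vaccinazioni; infer_instance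

-- ===== CLAIM (what is proved, stated in full; the proofs are below) =====
def Claim_equal_get_vaccinazioni : Prop := ∀ (testo : String), Dom_get_vaccinazioni testo → Spec_get_vaccinazioni testo (get_vaccinazioni testo)

-- ===== LEMMAS AND PROOFS =====

-- B's phase-4 output for a given start index
def pvBcoll (lines : List String) (s : Nat) : String :=
  PySem.Str.join "" ((List.range' s (pvFindE lines s - s)).map (fun j => " " ++ PySem.Str.strip (lines.getD j "")))

theorem join_empty_cons (p : List Char) (rest : List (List Char)) :
    PySem.Chars.join [] (p :: rest) = p ++ PySem.Chars.join [] rest := by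
  cases rest with
  | nil => simp [PySem.Chars.join, List.intercalate]
  | cons q r => rw [PySem.Chars.join_cons_cons]; simp

theorem sjoin_empty_cons (a : String) (l : List String) :
    PySem.Str.join "" (a :: l) = a ++ PySem.Str.join "" l := by
  apply String.ext
  show (PySem.Str.join "" (a :: l)).toList = _
  simp [PySem.Str.join, join_empty_cons]

theorem le_pvFindE (lines : List String) (i : Nat) : i ≤ pvFindE lines i := by
  have key : ∀ k j, lines.length - j ≤ k → j ≤ pvFindE lines j := by
    intro k
    induction k with
    | zero =>
      intro j hk
      rw [pvFindE, dif_neg (by omega)]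
    | succ k ih =>
      intro j hk
      rw [pvFindE]
      by_cases h : j < lines.length
      · rw [dif_pos h]
        split
        · exact le_trans (by omega) (ih (j+1) (by omega))
        · exact le_refl j
      · rw [dif_neg h]
  exact key lines.length i (by omega)

theorem pvFindH_le (lines : List String) (i : Nat) (hi : i ≤ lines.length) :
    pvFindH lines i ≤ lines.length := by
  have key : ∀ k j, lines.length - j ≤ k → j ≤ lines.length → pvFindH lines j ≤ lines.length := by
    intro k
    induction k with
    | zero =>
      intro j hk hj
      rw [pvFindH, dif_neg (by omega)]; exact hj
    | succ k ih =>
      intro j hk hj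
      rw [pvFindH]
      by_cases h : j < lines.length
      · rw [dif_pos h]
        split
        · exact ih (j+1) (by omega) (by omega)
        · exact hj
      · rw [dif_neg h]; exact hj
  exact key lines.length i (by omega) hi

-- pvBcoll at an index past the end, or at a break point, is empty
theorem pvBcoll_stop (lines : List String) (i : Nat) (h : pvFindE lines i = i) :
    pvBcoll lines i = "" := by
  simp [pvBcoll, h, PySem.Str.join, PySem.Chars.join, List.intercalate]

-- pvBcoll peels one collected line when the end condition does not fire at i
theorem pvBcoll_step (lines : List String) (i : Nat) (h : pvFindE lines i = pvFindE lines (i+1)) :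
    pvBcoll lines i = (" " ++ PySem.Str.strip (lines.getD i "")) ++ pvBcoll lines (i+1) := by
  have hle : i + 1 ≤ pvFindE lines (i+1) := le_pvFindE lines (i+1)
  have hn : pvFindE lines i - i = (pvFindE lines (i+1) - (i+1)) + 1 := by omega
  rw [pvBcoll, hn, List.range'_succ, List.map_cons, sjoin_empty_cons]
  rfl

theorem collect_eq (lines : List String) (i : Nat) (para : String) :
    pvLoopA lines i para true true = para ++ pvBcoll lines i := by
  have key : ∀ k j, lines.length - j ≤ k → ∀ para,
      pvLoopA lines j para true true = para ++ pvBcoll lines j := by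
    intro k
    induction k with
    | zero =>
      intro j hk para
      rw [pvLoopA, dif_neg (by omega), pvBcoll_stop lines j (by rw [pvFindE, dif_neg (by omega)])]
      simp
    | succ k ih =>
      intro j hk para
      rw [pvLoopA]
      by_cases h : j < lines.length
      · rw [dif_pos h]
        simp only []
        rw [if_neg (by simp), if_pos trivial, if_neg (by simp)]
        cases hb : ((PySem.Str.strip (lines.getD j "") == "") && decide (j+1 < lines.length) && !(PySem.Str.strip (lines.getD (j+1) "") == "")) with
        | true =>
          rw [if_pos rfl, pvBcoll_stop lines j (by rw [pvFindE, dif_pos h, if_neg (by rw [hb]; simp)])]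
          simp
        | false =>
          rw [if_neg (by simp), ih (j+1) (by omega),
            pvBcoll_step lines j (by rw [pvFindE, dif_pos h, if_pos (by rw [hb]; rfl)])]
          simp [String.append_assoc]
      · rw [dif_neg h, pvBcoll_stop lines j (by rw [pvFindE, dif_neg h])]
        simp
  exact key lines.length i (by omega) para

theorem skip_eq (lines : List String) (i : Nat) (para : String) :
    pvLoopA lines i para true false = para ++ pvBcoll lines (pvSkipS lines i) := by
  have key : ∀ k j, lines.length - j ≤ k → ∀ para,
      pvLoopA lines j para true false = para ++ pvBcoll lines (pvSkipS lines j) := by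
    intro k
    induction k with
    | zero =>
      intro j hk para
      rw [pvLoopA, dif_neg (by omega), pvSkipS, dif_neg (by omega),
        pvBcoll_stop lines j (by rw [pvFindE, dif_neg (by omega)])]
      simp
    | succ k ih =>
      intro j hk para
      rw [pvLoopA]
      by_cases h : j < lines.length
      · rw [dif_pos h]
        simp only []
        rw [if_neg (by simp), if_pos trivial]
        cases hs : (PySem.Str.strip (lines.getD j "") == "") with
        | true =>
          have hsk : pvSkipS lines j = pvSkipS lines (j+1) := by
            rw [pvSkipS, dif_pos h, if_pos hs]
          rw [if_pos (by simp), ih (j+1) (by omega), hsk]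
        | false =>
          have hb : ((PySem.Str.strip (lines.getD j "") == "") && decide (j+1 < lines.length) && !(PySem.Str.strip (lines.getD (j+1) "") == "")) = false := by
            rw [hs]; simp
          have hsk : pvSkipS lines j = j := by
            rw [pvSkipS, dif_pos h, if_neg (by rw [hs]; simp)]
          rw [if_neg (by simp), if_neg (by simp), collect_eq, hsk,
            pvBcoll_step lines j (by rw [pvFindE, dif_pos h, if_pos (by rw [hb]; rfl)])]
          simp [String.append_assoc]
      · rw [dif_neg h, pvSkipS, dif_neg h,
          pvBcoll_stop lines j (by rw [pvFindE, dif_neg h])]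
        simp
  exact key lines.length i (by omega) para

theorem header_eq (lines : List String) (i : Nat) :
    pvLoopA lines i "" false false =
      if pvFindH lines i < lines.length then
        "Vaccinazioni:\n" ++ pvBcoll lines (pvSkipS lines (pvFindH lines i + 1))
      else "" := by
  have key : ∀ k j, lines.length - j ≤ k →
      pvLoopA lines j "" false false =
        if pvFindH lines j < lines.length then
          "Vaccinazioni:\n" ++ pvBcoll lines (pvSkipS lines (pvFindH lines j + 1))
        else "" := by
    intro k
    induction k with
    | zero =>
      intro j hk
      rw [pvLoopA, dif_neg (by omega), pvFindH, dif_neg (by omega), if_neg (by omega)]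
    | succ k ih =>
      intro j hk
      rw [pvLoopA]
      by_cases h : j < lines.length
      · rw [dif_pos h]
        simp only []
        cases hm : (PySem.Str.lower (PySem.Str.strip (lines.getD j "")) == "vaccinazioni") with
        | true =>
          have hfh : pvFindH lines j = j := by
            rw [pvFindH, dif_pos h, if_neg (by rw [hm]; simp)]
          rw [if_pos (by simp), skip_eq, hfh, if_pos h]
          simp
        | false =>
          have hfh : pvFindH lines j = pvFindH lines (j+1) := by
            rw [pvFindH, dif_pos h, if_pos (by rw [hm]; rfl)]
          rw [if_neg (by simp), if_neg (by simp), ih (j+1) (by omega), hfh]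
      · rw [dif_neg h, pvFindH, dif_neg h, if_neg (by omega)]
  exact key lines.length i (by omega)

-- ===== VERDICT (by name: the statement is the Claim_ definition above) =====
theorem get_vaccinazioni_spec : Claim_equal_get_vaccinazioni := by
  unfold Claim_equal_get_vaccinazioni Spec_get_vaccinazioni
  intro testo _
  unfold get_vaccinazioni get_vaccinazioni_alt
  simp only []
  rw [header_eq]
  by_cases h : pvFindH (PySem.Str.splitlines testo) 0 < (PySem.Str.splitlines testo).length
  · rw [if_pos h, if_neg (by simp), if_neg (by simp; omega)]
    simp [pvBcoll]
  · have h0 : pvFindH (PySem.Str.splitlines testo) 0 = (PySem.Str.splitlines testo).length :=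
      le_antisymm (pvFindH_le _ 0 (by omega)) (by omega)
    rw [if_neg h, if_pos (by simp), if_pos (by simp [h0])]
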